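-- pv_equiv track=rewrite | github.com/leneric1818-a11y/tm-reg | analysis/llm_baseline.py | extract_source_category_from_history
-- ===== SOURCE A (Python) =====
-- from typing import List, Dict, Tuple, Optional, Any
--
-- def extract_source_category_from_history(conversation_history: str) -> Optional[str]:
--     """Extract the source category (last speaker's category) from conversation history."""
--     if not conversation_history:
--         return None
--
--     # Split by newlines to get individual turns
--     turns = conversation_history.strip().split('\n')
--     if not turns:
--         return None
--
--     # Get the last turn that has a category
--     for turn in reversed(turns):
--         if '(' in turn and ')' in turn:
--             try:
--                 start = turn.find('(') + 1
--                 end = turn.find(')', start)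
--                 if start > 0 and end > start:
--                     category_part = turn[start:end]
--                     # Split by | and take the first part (the category code)
--                     if '|' in category_part:
--                         return category_part.split('|')[0].strip()
--                     return category_part.strip()
--             except:
--                 continue
--     return None
-- ===== SOURCE B (Python) =====
-- def extract_source_category_from_history(conversation_history: str):
--     """Forward scan with an accumulator: the last turn with a valid '(...)' wins."""
--     result = None
--     for turn in conversation_history.strip().split('\n'):
--         if '(' in turn:
--             start = turn.find('(') + 1
--             end = turn.find(')', start)
--             if end > start:
--                 result = turn[start:end].split('|')[0].strip()
--     return result
-- ===== Notes on version B (the rewrite author's own statement) =====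
-- stated objective: simpler
-- what changed: Replaces the reverse-scan-with-early-return by a single forward scan that keeps the last valid parenthesized extraction in an accumulator, dropping the redundant closing-paren membership, start>0 and pipe-membership guards and the unreachable try/except.
import Mathlib
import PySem

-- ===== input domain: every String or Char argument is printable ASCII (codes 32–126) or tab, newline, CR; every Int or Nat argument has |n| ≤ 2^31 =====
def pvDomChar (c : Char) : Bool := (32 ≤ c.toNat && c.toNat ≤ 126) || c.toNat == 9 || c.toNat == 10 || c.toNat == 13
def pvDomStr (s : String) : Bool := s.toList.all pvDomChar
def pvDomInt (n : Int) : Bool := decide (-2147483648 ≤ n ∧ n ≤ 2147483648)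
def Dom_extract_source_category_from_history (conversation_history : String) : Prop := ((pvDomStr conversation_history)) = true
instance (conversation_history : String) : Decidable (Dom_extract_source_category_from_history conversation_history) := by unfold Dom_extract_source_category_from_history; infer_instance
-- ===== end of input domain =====

-- B replaces A's reversed-scan-with-early-return by a single forward scan keeping the last
-- valid extraction in an accumulator (objective: simpler — the redundant guards drop away).

-- ===== PORT A =====
-- A's per-turn body inside `for turn in reversed(turns)` (the try/except cannot fire: no
-- statement in the try block raises; `split('|')[0]` is ported as headD "" because
-- str.split always returns a non-empty list, so the indexing never raises).
def pvAExtract (turn : String) : Option String :=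
  if PySem.Str.isIn "(" turn && PySem.Str.isIn ")" turn then
    let start : Int := PySem.Str.find turn "(" + 1
    let end_ : Int := PySem.Str.findFrom turn ")" start
    if start > 0 ∧ end_ > start then
      let category_part := PySem.Str.slice turn (some start) (some end_)
      if PySem.Str.isIn "|" category_part then
        some (PySem.Str.strip
          (((PySem.Chars.splitOn category_part.toList "|".toList).map String.ofList).headD ""))
      else
        some (PySem.Str.strip category_part)
    else none
  else none

-- `for turn in reversed(turns): … return …` = first hit on the reversed list
def pvALoop : List String → Option String
  | [] => none
  | t :: rest =>
    match pvAExtract t with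
    | some v => some v
    | none => pvALoop rest

def extract_source_category_from_history (conversation_history : String) : Option String :=
  if conversation_history = "" then none
  else
    -- s.split('\n') with a non-empty separator is Chars.splitOn on the code points
    let turns := (PySem.Chars.splitOn (PySem.Str.strip conversation_history).toList "\n".toList).map String.ofList
    if turns.isEmpty then none
    else pvALoop turns.reverse

-- ===== PORT B =====
-- B's per-turn body: one guard, unconditional split('|')[0]
def pvBExtract (turn : String) : Option String :=
  if PySem.Str.isIn "(" turn then
    let start : Int := PySem.Str.find turn "(" + 1
    let end_ : Int := PySem.Str.findFrom turn ")" start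
    if end_ > start then
      some (PySem.Str.strip
        (((PySem.Chars.splitOn (PySem.Str.slice turn (some start) (some end_)).toList "|".toList).map String.ofList).headD ""))
    else none
  else none

def extract_source_category_from_history_alt (conversation_history : String) : Option String :=
  ((PySem.Chars.splitOn (PySem.Str.strip conversation_history).toList "\n".toList).map String.ofList).foldl
    (fun result turn =>
      match pvBExtract turn with
      | some v => some v
      | none => result) none

-- ===== PRECONDITION & SPEC =====
def Spec_extract_source_category_from_history (conversation_history : String) (out : Option String) : Prop := out = extract_source_category_from_history_alt conversation_history
instance (conversation_history : String) (out : Option String) : Decidable (Spec_extract_source_category_from_history conversation_history out) := by unfold Spec_extract_source_category_from_history; infer_instance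

-- ===== CLAIM (what is proved, stated in full; the proofs are below) =====
def Claim_equal_extract_source_category_from_history : Prop := ∀ (conversation_history : String), Dom_extract_source_category_from_history conversation_history → Spec_extract_source_category_from_history conversation_history (extract_source_category_from_history conversation_history)

-- ===== LEMMAS AND PROOFS =====

-- splitOn.go never returns the empty list
theorem pv_go_ne_nil (sep : List Char) :
    ∀ (fuel : Nat) (l cur : List Char) (acc : List (List Char)),
      PySem.Chars.splitOn.go sep fuel l cur acc ≠ [] := by
  intro fuel
  induction fuel with
  | zero => intro l cur acc; simp [PySem.Chars.splitOn.go]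
  | succ n ih =>
    intro l cur acc
    cases l with
    | nil => simp [PySem.Chars.splitOn.go]
    | cons c rest =>
      simp only [PySem.Chars.splitOn.go]
      split
      · exact ih _ _ _
      · exact ih _ _ _

theorem pv_splitOn_ne_nil (l sep : List Char) : PySem.Chars.splitOn l sep ≠ [] :=
  pv_go_ne_nil sep _ _ _ _

-- if sep never occurs in l, go just copies l into the current piece
theorem pv_go_no_occ (sep : List Char) :
    ∀ (fuel : Nat) (l cur : List Char) (acc : List (List Char)), ¬ sep <:+: l →
      PySem.Chars.splitOn.go sep fuel l cur acc = ((cur.reverse ++ l) :: acc).reverse := by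
  intro fuel
  induction fuel with
  | zero => intro l cur acc _; simp [PySem.Chars.splitOn.go]
  | succ n ih =>
    intro l cur acc h
    cases l with
    | nil => simp [PySem.Chars.splitOn.go]
    | cons c rest =>
      have hpre : sep.isPrefixOf (c :: rest) = false := by
        by_contra hfalse
        exact h ((List.isPrefixOf_iff_prefix.mp (by simpa using hfalse)).isInfix)
      simp only [PySem.Chars.splitOn.go, hpre, if_neg Bool.false_ne_true]
      rw [ih rest (c :: cur) acc (fun hin => h (hin.trans (List.suffix_cons c rest).isInfix))]
      simp

-- no separator present → split returns the whole string as its single piece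
theorem pv_splitOn_no_occ (l sep : List Char) (h : ¬ sep <:+: l) :
    PySem.Chars.splitOn l sep = [l] := by
  unfold PySem.Chars.splitOn
  rw [pv_go_no_occ sep _ l [] [] h]
  simp

-- the two per-turn extractors agree
theorem pvExtract_eq (t : String) : pvAExtract t = pvBExtract t := by
  cases h1 : PySem.Str.isIn "(" t with
  | false =>
    have h1' : PySem.Chars.isIn ['('] t.toList = false := by simpa using h1
    simp [pvAExtract, pvBExtract, h1']
  | true =>
    have hinf : "(".toList <:+: t.toList := by
      have h1' : PySem.Chars.isIn "(".toList t.toList = true := by simpa using h1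
      exact (PySem.Chars.isIn_iff_infix _ _).mp h1'
    have hfind : 0 ≤ PySem.Chars.find t.toList "(".toList :=
      (PySem.Chars.find_nonneg_iff _ _).mpr hinf
    have hstart : (0 : Int) < PySem.Str.find t "(" + 1 := by
      simp only [PySem.Str.find_eq]; omega
    cases h2 : PySem.Str.isIn ")" t with
    | true =>
      simp only [pvAExtract, pvBExtract, h1, h2, Bool.and_self, if_true]
      rw [if_congr (show (PySem.Str.find t "(" + 1 > 0 ∧
            PySem.Str.findFrom t ")" (PySem.Str.find t "(" + 1) > PySem.Str.find t "(" + 1) ↔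
            (PySem.Str.findFrom t ")" (PySem.Str.find t "(" + 1) > PySem.Str.find t "(" + 1) from
          ⟨fun h => h.2, fun h => ⟨hstart, h⟩⟩) rfl rfl]
      by_cases hc : PySem.Str.findFrom t ")" (PySem.Str.find t "(" + 1) > PySem.Str.find t "(" + 1
      · rw [if_pos hc, if_pos hc]
        by_cases h3 : PySem.Str.isIn "|" (PySem.Str.slice t (some (PySem.Str.find t "(" + 1))
            (some (PySem.Str.findFrom t ")" (PySem.Str.find t "(" + 1)))) = true
        · rw [if_pos h3]
        · rw [if_neg h3]
          have hno : ¬ "|".toList <:+: (PySem.Str.slice t (some (PySem.Str.find t "(" + 1))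
              (some (PySem.Str.findFrom t ")" (PySem.Str.find t "(" + 1)))).toList :=
            (PySem.Chars.isIn_eq_false_iff _ _).mp (by
              simpa using (Bool.not_eq_true _).mp h3)
          rw [pv_splitOn_no_occ _ _ hno]
          simp
          rw [← PySem.Chars.slice_eq_listSlice, ← PySem.Str.toList_slice, String.ofList_toList]
      · rw [if_neg hc, if_neg hc]
    | false =>
      -- ')' absent: find(')', start) = -1, so end > start is false and both give None
      have hnoR : ¬ ")".toList <:+: t.toList :=
        (PySem.Chars.isIn_eq_false_iff _ _).mp (by simpa using h2)
      have hkeq : (PySem.Chars.find t.toList "(".toList) =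
          ((PySem.Chars.find t.toList "(".toList).toNat : Int) :=
        (Int.toNat_of_nonneg hfind).symm
      have hklt : (PySem.Chars.find t.toList "(".toList).toNat < t.toList.length := by
        by_contra hge
        have hdrop : t.toList.drop (PySem.Chars.find t.toList "(".toList).toNat = [] :=
          List.drop_eq_nil_of_le (by omega)
        have := (PySem.Chars.find_spec hfind).1
        rw [hdrop] at this
        simpa using List.prefix_nil.mp this
      have hff : PySem.Str.findFrom t ")" (PySem.Str.find t "(" + 1) = -1 := by
        simp only [PySem.Str.findFrom_eq, PySem.Str.find_eq]
        rw [hkeq]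
        have hcast : (((PySem.Chars.find t.toList "(".toList).toNat : Int) + 1) =
            (((PySem.Chars.find t.toList "(".toList).toNat + 1 : Nat) : Int) := by push_cast; ring
        rw [hcast]
        refine (PySem.Chars.findFrom_natCast_eq_neg_one_iff t.toList ")".toList _ (by omega)).mpr ?_
        intro hin
        exact hnoR (hin.trans (List.drop_suffix _ t.toList).isInfix)
      have hc : ¬ (PySem.Str.findFrom t ")" (PySem.Str.find t "(" + 1) > PySem.Str.find t "(" + 1) := by
        rw [hff]; omega
      simp only [pvAExtract, pvBExtract, h1, h2, Bool.and_false, if_false, Bool.false_eq_true, if_true]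
      rw [if_neg hc]

-- A's loop over a concatenation
theorem pvALoop_append (xs ys : List String) :
    pvALoop (xs ++ ys) =
      match pvALoop xs with
      | some v => some v
      | none => pvALoop ys := by
  induction xs with
  | nil => simp [pvALoop]
  | cons t rest ih =>
    simp only [List.cons_append, pvALoop]
    cases pvAExtract t with
    | some v => rfl
    | none => exact ih

-- B's forward fold keeps the last valid extraction = A's first hit on the reversed list
theorem pvFold_eq_loop (l : List String) :
    ∀ acc : Option String,
      l.foldl (fun result turn =>
        match pvBExtract turn with
        | some v => some v
        | none => result) acc =
      match pvALoop l.reverse with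
      | some v => some v
      | none => acc := by
  induction l with
  | nil => intro acc; simp [pvALoop]
  | cons t rest ih =>
    intro acc
    simp only [List.foldl_cons, List.reverse_cons]
    rw [ih, pvALoop_append]
    cases h : pvALoop rest.reverse with
    | some v => rfl
    | none =>
      simp only [pvALoop, ← pvExtract_eq t]
      cases pvAExtract t <;> rfl

-- ===== VERDICT (by name: the statement is the Claim_ definition above) =====
theorem extract_source_category_from_history_spec : Claim_equal_extract_source_category_from_history := by
  intro ch _
  unfold Spec_extract_source_category_from_history
  unfold extract_source_category_from_history extract_source_category_from_history_alt
  by_cases hch : ch = ""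
  · subst hch; decide
  · simp only [if_neg hch]
    have hne : ((PySem.Chars.splitOn (PySem.Str.strip ch).toList "\n".toList).map String.ofList).isEmpty = false := by
      simp [List.isEmpty_eq_false_iff, pv_splitOn_ne_nil]
    simp only [hne, Bool.false_eq_true, if_false]
    rw [pvFold_eq_loop]
    cases pvALoop (((PySem.Chars.splitOn (PySem.Str.strip ch).toList "\n".toList).map String.ofList).reverse) <;> rfl
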